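-- pv_equiv track=rewrite | github.com/AdemVessell/ghost-meadow | benchmarks/enclave/enclave_topologies.py | make_corridor
-- ===== SOURCE A (Python) =====
-- def make_corridor(num_nodes, rng):
--     """Linear hallway with occasional skip-links.
--     Models: sensor array along a corridor, pipeline, or conveyor."""
--     adj = {i: set() for i in range(num_nodes)}
--     for i in range(num_nodes - 1):
--         adj[i].add(i + 1)
--         adj[i + 1].add(i)
--     # Skip-links every ~4 nodes (doors, cross-corridors)
--     for i in range(0, num_nodes - 2, 4):
--         j = min(i + 2, num_nodes - 1)
--         adj[i].add(j)
--         adj[j].add(i)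
--     return adj
-- ===== SOURCE B (Python) =====
-- def make_corridor(num_nodes, rng):
--     """Linear hallway with occasional skip-links.
--     Models: sensor array along a corridor, pipeline, or conveyor."""
--     adj = {}
--     for k in range(num_nodes):
--         nbrs = set()
--         if k >= 1:
--             nbrs.add(k - 1)
--         if k <= num_nodes - 2:
--             nbrs.add(k + 1)
--         if k >= 2 and (k - 2) % 4 == 0 and k - 2 <= num_nodes - 3:
--             nbrs.add(k - 2)
--         if k % 4 == 0 and k <= num_nodes - 3:
--             nbrs.add(k + 2)
--         adj[k] = nbrs
--     return adj
-- ===== Notes on version B (the rewrite author's own statement) =====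
-- stated objective: alternative
-- what changed: B computes each node's neighbor set directly from its own index arithmetic in a single pass over the nodes (k-1/k+1 bounds checks plus modular conditions for the two skip-link directions), instead of A's two edge-building passes that symmetrize endpoints into pre-initialized sets.
import Mathlib
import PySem

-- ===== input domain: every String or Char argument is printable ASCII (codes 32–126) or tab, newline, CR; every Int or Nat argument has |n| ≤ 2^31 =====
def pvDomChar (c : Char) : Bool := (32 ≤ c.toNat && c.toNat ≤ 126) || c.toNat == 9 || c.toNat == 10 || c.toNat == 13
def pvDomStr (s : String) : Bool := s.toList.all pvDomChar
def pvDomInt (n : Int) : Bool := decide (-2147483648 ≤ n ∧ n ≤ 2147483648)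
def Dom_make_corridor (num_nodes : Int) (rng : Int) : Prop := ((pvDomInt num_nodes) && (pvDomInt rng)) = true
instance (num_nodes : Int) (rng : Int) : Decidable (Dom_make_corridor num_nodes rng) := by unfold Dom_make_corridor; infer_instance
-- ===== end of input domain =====

-- B computes each node's neighbor set directly from index arithmetic in one pass over the
-- nodes, instead of A's two edge-building passes that symmetrize endpoints ("alternative").

-- ===== PORT A =====
-- adj = {i: set() for i in range(num_nodes)}; then the two edge loops mutate adj[i] in
-- place: ported as Dict.modify (the touched keys are always present, so no KeyError arises).
def make_corridor (num_nodes : Int) (rng : Int) : List (Int × List Int) :=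
  let adj : PySem.Dict Int (PySem.Set Int) :=
    (PySem.List.pyRange 0 num_nodes 1).foldl
      (fun d i => d.insert i PySem.Set.empty) PySem.Dict.empty
  -- for i in range(num_nodes - 1): adj[i].add(i + 1); adj[i + 1].add(i)
  let adj :=
    (PySem.List.pyRange 0 (num_nodes - 1) 1).foldl
      (fun d i =>
        (d.modify i PySem.Set.empty (fun s => s.add (i + 1))).modify (i + 1)
          PySem.Set.empty (fun s => s.add i)) adj
  -- for i in range(0, num_nodes - 2, 4): j = min(i + 2, num_nodes - 1); adj[i].add(j); adj[j].add(i)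
  let adj :=
    (PySem.List.pyRange 0 (num_nodes - 2) 4).foldl
      (fun d i =>
        let j := min (i + 2) (num_nodes - 1)
        (d.modify i PySem.Set.empty (fun s => s.add j)).modify j
          PySem.Set.empty (fun s => s.add i)) adj
  adj.items

-- ===== PORT B =====
def mkNbrs (num_nodes : Int) (k : Int) : PySem.Set Int :=
  let s : PySem.Set Int := PySem.Set.empty
  let s := if 1 ≤ k then s.add (k - 1) else s
  let s := if k ≤ num_nodes - 2 then s.add (k + 1) else s
  let s := if 2 ≤ k ∧ PySem.Int.mod (k - 2) 4 = 0 ∧ k - 2 ≤ num_nodes - 3 then s.add (k - 2) else s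
  if PySem.Int.mod k 4 = 0 ∧ k ≤ num_nodes - 3 then s.add (k + 2) else s

def make_corridor_alt (num_nodes : Int) (rng : Int) : List (Int × List Int) :=
  ((PySem.List.pyRange 0 num_nodes 1).foldl
      (fun d k => d.insert k (mkNbrs num_nodes k)) PySem.Dict.empty).items

-- ===== PRECONDITION & SPEC =====
def Spec_make_corridor (num_nodes : Int) (rng : Int) (out : List (Int × List Int)) : Prop := out = make_corridor_alt num_nodes rng
instance (num_nodes : Int) (rng : Int) (out : List (Int × List Int)) : Decidable (Spec_make_corridor num_nodes rng out) := by unfold Spec_make_corridor; infer_instance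

-- ===== CLAIM (what is proved, stated in full; the proofs are below) =====
def Claim_equal_make_corridor : Prop := ∀ (num_nodes : Int) (rng : Int), Dom_make_corridor num_nodes rng → Spec_make_corridor num_nodes rng (make_corridor num_nodes rng)

-- ===== LEMMAS AND PROOFS =====

-- a fold whose steps preserve the key list preserves the key list
theorem pv_foldl_keys_fixed {ν : Type} (l : List Int)
    (step : PySem.Dict Int ν → Int → PySem.Dict Int ν) (K : List Int)
    (h : ∀ d : PySem.Dict Int ν, d.keys = K → ∀ i ∈ l, (step d i).keys = K) :
    ∀ d : PySem.Dict Int ν, d.keys = K → (l.foldl step d).keys = K := by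
  induction l with
  | nil => intro d hd; simpa using hd
  | cons x xs ih =>
    intro d hd
    simp only [List.foldl_cons]
    exact ih (fun d' hd' i hi => h d' hd' i (List.mem_cons_of_mem _ hi)) _
      (h d hd x (List.mem_cons_self))

-- the value at one key k commutes through a fold of dict steps acting pointwise at k
theorem pv_foldl_getD_act {ν : Type} (l : List Int)
    (step : PySem.Dict Int ν → Int → PySem.Dict Int ν) (act : Int → ν → ν)
    (k : Int) (d0 : ν)
    (h : ∀ d : PySem.Dict Int ν, ∀ i ∈ l, (step d i).getD k d0 = act i (d.getD k d0)) :
    ∀ d : PySem.Dict Int ν, (l.foldl step d).getD k d0 = l.foldl (fun s i => act i s) (d.getD k d0) := by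
  induction l with
  | nil => intro d; simp
  | cons x xs ih =>
    intro d
    simp only [List.foldl_cons]
    rw [ih (fun d' i hi => h d' i (List.mem_cons_of_mem _ hi)), h d x (List.mem_cons_self)]

theorem pv_pyRange_four_nil (a b : Int) (h : b ≤ a) :
    PySem.List.pyRange a b 4 = [] := by
  rw [PySem.List.pyRange_of_pos a b (by norm_num), if_neg (by omega)]
  simp

-- cons law for a step-4 range
theorem pv_pyRange_four_cons (a b : Int) (h : a < b) :
    PySem.List.pyRange a b 4 = a :: PySem.List.pyRange (a + 4) b 4 := by
  rw [PySem.List.pyRange_of_pos a b (by norm_num),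
      PySem.List.pyRange_of_pos (a + 4) b (by norm_num), if_pos h]
  have hq : (0:Int) ≤ (b - a - 1) / 4 := Int.ediv_nonneg (by omega) (by norm_num)
  have h2 : (b - a + 4 - 1) / 4 = (b - a - 1) / 4 + 1 := by
    rw [show b - a + 4 - 1 = (b - a - 1) + 1 * 4 by ring, Int.add_mul_ediv_right _ _ (by norm_num)]
  have h3 : ((b - a + 4 - 1) / 4).toNat = ((b - a - 1) / 4).toNat + 1 := by omega
  have h4 : (if a + 4 < b then ((b - (a + 4) + 4 - 1) / 4).toNat else 0) = ((b - a - 1) / 4).toNat := by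
    by_cases h5 : a + 4 < b
    · rw [if_pos h5, show b - (a + 4) + 4 - 1 = b - a - 1 by ring]
    · rw [if_neg h5]
      have : (b - a - 1) / 4 = 0 := Int.ediv_eq_zero_of_lt (by omega) (by omega)
      omega
  rw [h3, h4, List.range_succ_eq_map, List.map_cons, List.map_map]
  congr 1
  · norm_num
  · apply List.map_congr_left
    intro x _
    simp only [Function.comp_apply]
    push_cast
    ring

-- phase-2 value fold at key k: the adjacent neighbours, in A's insertion order
theorem le_or_lt' (a b : Int) : a ≤ b ∨ b < a := by omega

theorem pv_phase2 (k b : Int) : ∀ (t : Nat) (a : Int) (s : PySem.Set Int), (b - a).toNat ≤ t →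
    (a ≤ k - 1 → (k - 1) ∉ s) → (a ≤ k → (k + 1) ∉ s) →
    (PySem.List.pyRange a b 1).foldl
        (fun (s : PySem.Set Int) i => if k = i + 1 then s.add i else if k = i then s.add (i + 1) else s) s
      = s ++ (if a ≤ k - 1 ∧ k - 1 < b then [k - 1] else []) ++ (if a ≤ k ∧ k < b then [k + 1] else []) := by
  intro t
  induction t with
  | zero =>
    intro a s ht h1 h2
    rw [PySem.List.pyRange_one_eq_nil (by omega), if_neg (by omega), if_neg (by omega)]
    simp
  | succ t ih =>
    intro a s ht h1 h2
    rcases le_or_lt' b a with hba | hab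
    · rw [PySem.List.pyRange_one_eq_nil hba, if_neg (by omega), if_neg (by omega)]
      simp
    · rw [PySem.List.pyRange_one_cons hab, List.foldl_cons]
      by_cases hA : k = a + 1
      · rw [if_pos hA, PySem.Set.add_of_not_mem
          (show a ∉ s by simpa [show a = k - 1 by omega] using h1 (by omega))]
        rw [ih (a + 1) (s ++ [a]) (by omega) (fun hle => absurd hle (by omega))
            (fun hle => by
              intro hmem
              rcases List.mem_append.mp hmem with hm | hm
              · exact h2 (by omega) hm
              · simp only [List.mem_singleton] at hm; omega)]
        rw [if_neg (by omega), if_pos (show a ≤ k - 1 ∧ k - 1 < b from by constructor <;> omega)]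
        have e2 : (a + 1 ≤ k ∧ k < b) = (a ≤ k ∧ k < b) := by
          apply propext; constructor <;> rintro ⟨x1, x2⟩ <;> exact ⟨by omega, x2⟩
        simp only [e2]
        simp [show a = k - 1 by omega]
      · by_cases hB : k = a
        · rw [if_neg hA, if_pos hB, PySem.Set.add_of_not_mem
            (show a + 1 ∉ s by simpa [show a + 1 = k + 1 by omega] using h2 (by omega))]
          rw [ih (a + 1) (s ++ [a + 1]) (by omega) (fun hle => absurd hle (by omega))
              (fun hle => absurd hle (by omega))]
          rw [if_neg (by omega), if_neg (by omega), if_neg (by omega),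
              if_pos (show a ≤ k ∧ k < b from by constructor <;> omega)]
          simp [show a + 1 = k + 1 by omega]
        · rw [if_neg hA, if_neg hB]
          rw [ih (a + 1) s (by omega) (fun hle => h1 (by omega)) (fun hle => h2 (by omega))]
          have e1 : (a + 1 ≤ k - 1 ∧ k - 1 < b) = (a ≤ k - 1 ∧ k - 1 < b) := by
            apply propext; constructor <;> rintro ⟨x1, x2⟩ <;> exact ⟨by omega, x2⟩
          have e2 : (a + 1 ≤ k ∧ k < b) = (a ≤ k ∧ k < b) := by
            apply propext; constructor <;> rintro ⟨x1, x2⟩ <;> exact ⟨by omega, x2⟩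
          simp only [e1, e2]

-- phase-3 value fold at key k: the skip-link neighbours, in A's insertion order
theorem pv_phase3 (k m : Int) : ∀ (t : Nat) (a : Int) (s : PySem.Set Int), (m - a).toNat ≤ t →
    0 ≤ a → (4 : Int) ∣ a →
    (a ≤ k - 2 → (k - 2) ∉ s) → (a ≤ k → (k + 2) ∉ s) →
    (PySem.List.pyRange a m 4).foldl
        (fun (s : PySem.Set Int) i => if k = i + 2 then s.add i else if k = i then s.add (i + 2) else s) s
      = s ++ (if a ≤ k - 2 ∧ k - 2 < m ∧ (4 : Int) ∣ (k - 2) then [k - 2] else [])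
          ++ (if a ≤ k ∧ k < m ∧ (4 : Int) ∣ k then [k + 2] else []) := by
  intro t
  induction t with
  | zero =>
    intro a s ht ha hd4 h1 h2
    rw [pv_pyRange_four_nil a m (by omega), if_neg (by omega), if_neg (by omega)]
    simp
  | succ t ih =>
    intro a s ht ha hd4 h1 h2
    rcases le_or_lt' m a with hma | ham
    · rw [pv_pyRange_four_nil a m hma, if_neg (by omega), if_neg (by omega)]
      simp
    · rw [pv_pyRange_four_cons a m ham, List.foldl_cons]
      by_cases hA : k = a + 2
      · rw [if_pos hA, PySem.Set.add_of_not_mem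
          (show a ∉ s by simpa [show a = k - 2 by omega] using h1 (by omega))]
        rw [ih (a + 4) (s ++ [a]) (by omega) (by omega) (by omega)
            (fun hle => absurd hle (by omega))
            (fun hle => by
              intro hmem
              rcases List.mem_append.mp hmem with hm | hm
              · exact h2 (by omega) hm
              · simp only [List.mem_singleton] at hm; omega)]
        rw [if_neg (by omega), if_pos (show a ≤ k - 2 ∧ k - 2 < m ∧ (4:Int) ∣ (k - 2) from
          ⟨by omega, by omega, by omega⟩)]
        rw [if_neg (by omega), if_neg (by omega)]
        simp [show a = k - 2 by omega]
      · by_cases hB : k = a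
        · rw [if_neg hA, if_pos hB, PySem.Set.add_of_not_mem
            (show a + 2 ∉ s by simpa [show a + 2 = k + 2 by omega] using h2 (by omega))]
          rw [ih (a + 4) (s ++ [a + 2]) (by omega) (by omega) (by omega)
              (fun hle => absurd hle (by omega)) (fun hle => absurd hle (by omega))]
          rw [if_neg (by omega), if_neg (by omega), if_neg (by omega),
              if_pos (show a ≤ k ∧ k < m ∧ (4:Int) ∣ k from ⟨by omega, by omega, by omega⟩)]
          simp [show a + 2 = k + 2 by omega]
        · rw [if_neg hA, if_neg hB]
          rw [ih (a + 4) s (by omega) (by omega) (by omega)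
              (fun hle => h1 (by omega)) (fun hle => h2 (by omega))]
          have e1 : (a + 4 ≤ k - 2 ∧ k - 2 < m ∧ (4:Int) ∣ (k - 2)) = (a ≤ k - 2 ∧ k - 2 < m ∧ (4:Int) ∣ (k - 2)) := by
            apply propext; constructor <;> rintro ⟨x1, x2, x3⟩ <;> refine ⟨by omega, x2, x3⟩
          have e2 : (a + 4 ≤ k ∧ k < m ∧ (4:Int) ∣ k) = (a ≤ k ∧ k < m ∧ (4:Int) ∣ k) := by
            apply propext; constructor <;> rintro ⟨x1, x2, x3⟩ <;> refine ⟨by omega, x2, x3⟩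
          simp only [e1, e2]

theorem pv_mem_ite_singleton (c : Prop) [Decidable c] (x y : Int) :
    x ∈ (if c then [y] else ([] : List Int)) ↔ c ∧ x = y := by
  split_ifs with h <;> simp [h]

-- B's per-node set equals the concatenation form the two phase folds produce
theorem pv_add_ite (s : PySem.Set Int) (c : Prop) [Decidable c] (x : Int) (hx : x ∉ s) :
    (if c then s.add x else s) = s ++ (if c then [x] else []) := by
  split_ifs with h
  · exact PySem.Set.add_of_not_mem hx
  · exact (List.append_nil s).symm

theorem pv_mkNbrs_eq (n k : Int) (hk : 0 ≤ k) (hkn : k < n) :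
    mkNbrs n k
      = ((PySem.Set.empty : PySem.Set Int)
          ++ (if (0 : Int) ≤ k - 1 ∧ k - 1 < n - 1 then [k - 1] else [])
          ++ (if (0 : Int) ≤ k ∧ k < n - 1 then [k + 1] else []))
        ++ (if (0 : Int) ≤ k - 2 ∧ k - 2 < n - 2 ∧ (4 : Int) ∣ (k - 2) then [k - 2] else [])
        ++ (if (0 : Int) ≤ k ∧ k < n - 2 ∧ (4 : Int) ∣ k then [k + 2] else []) := by
  have e1 : ((0 : Int) ≤ k - 1 ∧ k - 1 < n - 1) = (1 ≤ k) := by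
    apply propext; constructor
    · rintro ⟨x1, x2⟩; omega
    · intro x; exact ⟨by omega, by omega⟩
  have e2 : ((0 : Int) ≤ k ∧ k < n - 1) = (k ≤ n - 2) := by
    apply propext; constructor
    · rintro ⟨x1, x2⟩; omega
    · intro x; exact ⟨by omega, by omega⟩
  have e3 : ((0 : Int) ≤ k - 2 ∧ k - 2 < n - 2 ∧ (4 : Int) ∣ (k - 2))
      = (2 ≤ k ∧ PySem.Int.mod (k - 2) 4 = 0 ∧ k - 2 ≤ n - 3) := by
    rw [PySem.Int.mod_eq_zero_iff_dvd]
    apply propext; constructor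
    · rintro ⟨x1, x2, x3⟩; exact ⟨by omega, x3, by omega⟩
    · rintro ⟨x1, x2, x3⟩; exact ⟨by omega, by omega, x2⟩
  have e4 : ((0 : Int) ≤ k ∧ k < n - 2 ∧ (4 : Int) ∣ k)
      = (PySem.Int.mod k 4 = 0 ∧ k ≤ n - 3) := by
    rw [PySem.Int.mod_eq_zero_iff_dvd]
    apply propext; constructor
    · rintro ⟨x1, x2, x3⟩; exact ⟨x3, by omega⟩
    · rintro ⟨x1, x2⟩; exact ⟨by omega, by omega, x1⟩
  simp only [e1, e2, e3, e4]
  simp only [mkNbrs]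
  rw [pv_add_ite (PySem.Set.empty : PySem.Set Int) (1 ≤ k) (k - 1)
      (by simp [PySem.Set.empty])]
  rw [pv_add_ite _ (k ≤ n - 2) (k + 1)
      (by simp only [pv_mem_ite_singleton, PySem.Set.empty, List.nil_append]; omega)]
  rw [pv_add_ite _ (2 ≤ k ∧ PySem.Int.mod (k - 2) 4 = 0 ∧ k - 2 ≤ n - 3) (k - 2)
      (by simp only [List.mem_append, pv_mem_ite_singleton, PySem.Set.empty,
            List.nil_append]; omega)]
  rw [pv_add_ite _ (PySem.Int.mod k 4 = 0 ∧ k ≤ n - 3) (k + 2)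
      (by simp only [List.mem_append, pv_mem_ite_singleton, PySem.Set.empty,
            List.nil_append]; omega)]

-- ===== VERDICT (by name: the statement is the Claim_ definition above) =====
theorem make_corridor_spec : Claim_equal_make_corridor := by
  intro n rng _
  show make_corridor n rng = make_corridor_alt n rng
  simp only [make_corridor, make_corridor_alt]
  set l := PySem.List.pyRange 0 n 1 with hl
  set d1 : PySem.Dict Int (PySem.Set Int) :=
    l.foldl (fun d i => d.insert i PySem.Set.empty) PySem.Dict.empty with hd1def
  set d2 : PySem.Dict Int (PySem.Set Int) :=
    (PySem.List.pyRange 0 (n - 1) 1).foldl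
      (fun d i =>
        (d.modify i PySem.Set.empty (fun s => s.add (i + 1))).modify (i + 1)
          PySem.Set.empty (fun s => s.add i)) d1 with hd2def
  set d3 : PySem.Dict Int (PySem.Set Int) :=
    (PySem.List.pyRange 0 (n - 2) 4).foldl
      (fun d i =>
        (d.modify i PySem.Set.empty (fun s => s.add (min (i + 2) (n - 1)))).modify
          (min (i + 2) (n - 1)) PySem.Set.empty (fun s => s.add i)) d2 with hd3def
  have hndl : l.Nodup := PySem.List.nodup_pyRange_one 0 n
  have hB : ((l.foldl (fun d k => d.insert k (mkNbrs n k)) PySem.Dict.empty) :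
      PySem.Dict Int (PySem.Set Int)).items = l.map (fun a => (a, mkNbrs n a)) := by
    rw [PySem.Dict.items_foldl_insert_fresh l (fun a => a) (fun a => mkNbrs n a)
        PySem.Dict.empty (fun a _ => PySem.Dict.contains_empty a) (by simpa using hndl)]
    rfl
  have hd1 : d1.items = l.map (fun i => (i, (PySem.Set.empty : PySem.Set Int))) := by
    rw [hd1def, PySem.Dict.items_foldl_insert_fresh l (fun a => a)
        (fun _ => (PySem.Set.empty : PySem.Set Int))
        PySem.Dict.empty (fun a _ => PySem.Dict.contains_empty a) (by simpa using hndl)]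
    rfl
  have hk1 : d1.keys = l := by
    show d1.items.map (·.1) = l
    rw [hd1, List.map_map]
    simp [Function.comp_def]
  have hk2 : d2.keys = l := by
    rw [hd2def]
    apply pv_foldl_keys_fixed _ _ l _ d1 hk1
    intro d hd i hi
    rw [PySem.List.mem_pyRange_one] at hi
    have hci : d.contains i = true := by
      rw [PySem.Dict.contains_iff_mem_keys, hd, hl, PySem.List.mem_pyRange_one]; omega
    have hci1 : (d.modify i PySem.Set.empty (fun s => s.add (i + 1))).contains (i + 1) = true := by
      rw [PySem.Dict.contains_modify]
      have h' : d.contains (i + 1) = true := by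
        rw [PySem.Dict.contains_iff_mem_keys, hd, hl, PySem.List.mem_pyRange_one]; omega
      simp [h']
    rw [PySem.Dict.keys_modify, PySem.Dict.keys_insert_of_contains _ _ hci1,
        PySem.Dict.keys_modify, PySem.Dict.keys_insert_of_contains _ _ hci, hd]
  have hk3 : d3.keys = l := by
    rw [hd3def]
    apply pv_foldl_keys_fixed _ _ l _ d2 hk2
    intro d hd i hi
    rw [PySem.List.mem_pyRange_iff_of_pos (by norm_num)] at hi
    have hj : min (i + 2) (n - 1) = i + 2 := by omega
    rw [hj]
    have hci : d.contains i = true := by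
      rw [PySem.Dict.contains_iff_mem_keys, hd, hl, PySem.List.mem_pyRange_one]; omega
    have hci2 : (d.modify i PySem.Set.empty (fun s => s.add (i + 2))).contains (i + 2) = true := by
      rw [PySem.Dict.contains_modify]
      have h' : d.contains (i + 2) = true := by
        rw [PySem.Dict.contains_iff_mem_keys, hd, hl, PySem.List.mem_pyRange_one]; omega
      simp [h']
    rw [PySem.Dict.keys_modify, PySem.Dict.keys_insert_of_contains _ _ hci2,
        PySem.Dict.keys_modify, PySem.Dict.keys_insert_of_contains _ _ hci, hd]
  have hnd3 : d3.keys.Nodup := by rw [hk3]; exact hndl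
  rw [PySem.Dict.items_eq_map_keys d3 hnd3 PySem.Set.empty, hk3, hB]
  apply List.map_congr_left
  intro k hkmem
  have hkb : 0 ≤ k ∧ k < n := by rw [hl] at hkmem; rwa [PySem.List.mem_pyRange_one] at hkmem
  have hv1 : d1.getD k PySem.Set.empty = (PySem.Set.empty : PySem.Set Int) :=
    PySem.Dict.getD_of_mem_items d1
      (by rw [hd1]; exact List.mem_map_of_mem hkmem) (by rwa [hk1]) _
  have hv2 : d2.getD k PySem.Set.empty
      = (PySem.List.pyRange 0 (n - 1) 1).foldl
          (fun (s : PySem.Set Int) i => if k = i + 1 then s.add i else if k = i then s.add (i + 1) else s)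
          (d1.getD k PySem.Set.empty) := by
    rw [hd2def]
    apply pv_foldl_getD_act
    intro d i hi
    simp only [PySem.Dict.getD_modify]
    by_cases hA : k = i + 1
    · rw [if_pos hA, if_neg (by omega), if_pos hA, ← hA]
    · by_cases hBc : k = i
      · rw [if_neg hA, if_pos hBc, if_neg hA, if_pos hBc, ← hBc]
      · rw [if_neg hA, if_neg hBc, if_neg hA, if_neg hBc]
  have hv3 : d3.getD k PySem.Set.empty
      = (PySem.List.pyRange 0 (n - 2) 4).foldl
          (fun (s : PySem.Set Int) i => if k = i + 2 then s.add i else if k = i then s.add (i + 2) else s)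
          (d2.getD k PySem.Set.empty) := by
    rw [hd3def]
    apply pv_foldl_getD_act
    intro d i hi
    rw [PySem.List.mem_pyRange_iff_of_pos (by norm_num)] at hi
    have hj : min (i + 2) (n - 1) = i + 2 := by omega
    simp only [hj, PySem.Dict.getD_modify]
    by_cases hA : k = i + 2
    · rw [if_pos hA, if_neg (by omega), if_pos hA, ← hA]
    · by_cases hBc : k = i
      · rw [if_neg hA, if_pos hBc, if_neg hA, if_pos hBc, ← hBc]
      · rw [if_neg hA, if_neg hBc, if_neg hA, if_neg hBc]
  rw [hv3, hv2, hv1]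
  rw [pv_phase2 k (n - 1) (n - 1 - 0).toNat 0 PySem.Set.empty le_rfl
      (fun _ => by simp [PySem.Set.empty]) (fun _ => by simp [PySem.Set.empty])]
  rw [pv_phase3 k (n - 2) (n - 2 - 0).toNat 0
      ((PySem.Set.empty : PySem.Set Int)
        ++ (if (0:Int) ≤ k - 1 ∧ k - 1 < n - 1 then [k - 1] else [])
        ++ (if (0:Int) ≤ k ∧ k < n - 1 then [k + 1] else []))
      le_rfl le_rfl ⟨0, rfl⟩
      (fun _ => by
        simp only [List.mem_append, pv_mem_ite_singleton, PySem.Set.empty,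
          List.nil_append]
        omega)
      (fun _ => by
        simp only [List.mem_append, pv_mem_ite_singleton, PySem.Set.empty,
          List.nil_append]
        omega)]
  rw [pv_mkNbrs_eq n k hkb.1 hkb.2]
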